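-- pv_equiv track=rewrite | github.com/pypi-data/pypi-mirror-42 | packages/leaf-properties/leaf_properties-0.2.1-py2.py3-none-any.whl/leaf_properties/utility/clustering.py | tri_to_adjacency
-- ===== SOURCE A (Python) =====
-- def shift_list(sequence, n):
--
--     """
--     Shifts over a sequence a number of times.
--
--     Parameters
--     ----------
--     sequence : list
--         List sequence to shift.
--     n : int
--         Number of iterations to shift.
--
--     Returns
--     -------
--     sequence : list
--         Shifted sequence.
--
--     """
--
--     # Checking if input 'seq' is a list.
--     if type(sequence) != list:
--         raise TypeError('Input parameter "seq" should be of type "list".')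
--
--     # Calculating the number of shifts as functionf of the length of seq.
--     # This is done to handle 'n' values larger than the length of seq.
--     n = n % len(sequence)
--     # Shifts and returns.
--     return sequence[n:] + sequence[:n]
--
-- def tri_to_adjacency(tri):
--
--     """
--     Creates a dictionary to store adjacency information from a 2D
--     triangular mesh (3 vertices per triangle).
--     The function will loop over an array of indices and walk over adjacent
--     indices (nodes in common) until no new index can be added.
--
--     Parameters
--     ----------
--     tri : array
--         2D trianguation indices.
--
--     Returns
--     -------
--     adj_dict : dictionary
--         Ajacency dictionary generated from walking over indices in tri.
--
--     """
--
--     # Initializing adj_dict and setting base column order (axis = 1).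
--     adj_dict = {}
--     columns = [0, 1, 2]
--     # Looping over column indices.
--     for c in columns:
--         # Shifting colum based on column index 'c'. If c = 0, no shifting
--         # happens.
--         ci = shift_list(columns, c)
--         # Looping over set of indices for triangle vertices.
--         for t in tri:
--             # Checks if current shifted base vertex (ci[0]) is already on
--             # adj_dict. If it is, append the other two vertices to it, if
--             # not, create a list with the second vertex under ci[0] as key
--             # and append the third to it.
--             if t[ci[0]] in adj_dict:
--                 adj_dict[t[ci[0]]].append(t[ci[1]])
--             else:
--                 adj_dict[t[ci[0]]] = [t[ci[1]]]
--             adj_dict[t[ci[0]]].append(t[ci[2]])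
--
--     return adj_dict
-- ===== SOURCE B (Python) =====
-- def _put(d, k, v):
--     # append the contribution list v to d[k], creating the entry if absent
--     if k in d:
--         d[k] += v
--     else:
--         d[k] = list(v)
--
--
-- def tri_to_adjacency(tri):
--     # One pass over the triangles, collecting each vertex's neighbours into
--     # three per-role buckets, then one merge pass (role 0, then 1, then 2).
--     b0, b1, b2 = {}, {}, {}
--     for t in tri:
--         v0, v1, v2 = t[0], t[1], t[2]
--         _put(b0, v0, [v1, v2])
--         _put(b1, v1, [v2, v0])
--         _put(b2, v2, [v0, v1])
--     adj_dict = {}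
--     for d in (b0, b1, b2):
--         for k, v in d.items():
--             _put(adj_dict, k, v)
--     return adj_dict
-- ===== Notes on version B (the rewrite author's own statement) =====
-- stated objective: alternative
-- what changed: Instead of A's three passes over the triangle list (one per shifted column order, using shift_list), B walks the triangles once, grouping each vertex's role-0/1/2 neighbour pairs into three per-role bucket dicts, and then merges the buckets key-wise into the result.
import Mathlib
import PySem

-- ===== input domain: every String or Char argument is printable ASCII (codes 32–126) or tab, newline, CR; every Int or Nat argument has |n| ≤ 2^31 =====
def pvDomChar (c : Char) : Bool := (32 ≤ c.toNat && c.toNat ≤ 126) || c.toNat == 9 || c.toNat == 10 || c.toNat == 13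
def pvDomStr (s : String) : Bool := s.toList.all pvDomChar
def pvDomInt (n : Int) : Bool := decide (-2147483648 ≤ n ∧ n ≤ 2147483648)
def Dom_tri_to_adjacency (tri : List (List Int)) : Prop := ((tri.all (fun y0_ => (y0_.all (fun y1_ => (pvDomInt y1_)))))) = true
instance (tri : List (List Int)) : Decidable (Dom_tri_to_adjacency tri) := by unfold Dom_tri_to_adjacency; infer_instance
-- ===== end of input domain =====

-- B replaces A's three shifted-column passes over the triangle list by a single pass into
-- three per-role bucket dicts plus a key-wise merge pass; alternative decomposition, same cost.

-- ===== PORT A =====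
def shift_list (sequence : List Int) (n : Int) : List Int :=
  let n := PySem.Int.mod n (sequence.length : Int)
  PySem.List.slice sequence (some n) none ++ PySem.List.slice sequence none (some n)

def tri_to_adjacency (tri : List (List Int)) : List (Int × List Int) :=
  let columns : List Int := [0, 1, 2]
  let adj := columns.foldl (fun adj c =>
    let ci := shift_list columns c
    tri.foldl (fun adj t =>
      -- t[ci[0]], t[ci[1]], t[ci[2]]: total pyGetD, exact under Pre_ (every row has ≥ 3 entries)
      let k := PySem.List.pyGetD t (PySem.List.pyGetD ci 0 0) 0
      let x := PySem.List.pyGetD t (PySem.List.pyGetD ci 1 0) 0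
      let y := PySem.List.pyGetD t (PySem.List.pyGetD ci 2 0) 0
      -- if t[ci[0]] in adj_dict: adj_dict[t[ci[0]]].append(t[ci[1]]) else: adj_dict[t[ci[0]]] = [t[ci[1]]]
      let adj1 := if adj.contains k then adj.modify k [] (· ++ [x]) else adj.insert k [x]
      -- adj_dict[t[ci[0]]].append(t[ci[2]])  (the key is present here, so modify's default is unused)
      adj1.modify k [] (· ++ [y])) adj) PySem.Dict.empty
  adj.items

-- ===== PORT B =====
-- _put(d, k, v): append the contribution list v to d[k], creating the entry if absent
def pyPut (d : PySem.Dict Int (List Int)) (k : Int) (v : List Int) : PySem.Dict Int (List Int) :=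
  if d.contains k then d.modify k [] (· ++ v) else d.insert k v

def tri_to_adjacency_alt (tri : List (List Int)) : List (Int × List Int) :=
  let bs := tri.foldl
    (fun (bs : PySem.Dict Int (List Int) × PySem.Dict Int (List Int) × PySem.Dict Int (List Int)) t =>
      let v0 := PySem.List.pyGetD t 0 0
      let v1 := PySem.List.pyGetD t 1 0
      let v2 := PySem.List.pyGetD t 2 0
      (pyPut bs.1 v0 [v1, v2], pyPut bs.2.1 v1 [v2, v0], pyPut bs.2.2 v2 [v0, v1]))
    (PySem.Dict.empty, PySem.Dict.empty, PySem.Dict.empty)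
  let adj := [bs.1, bs.2.1, bs.2.2].foldl
    (fun adj d => d.items.foldl (fun adj p => pyPut adj p.1 p.2) adj) PySem.Dict.empty
  adj.items

-- ===== PRECONDITION & SPEC =====
-- Pre_ excludes exactly the inputs where the Python A raises IndexError: a row with fewer than 3 entries.
def Pre_tri_to_adjacency (tri : List (List Int)) : Prop := ∀ t ∈ tri, 3 ≤ t.length
instance (tri : List (List Int)) : Decidable (Pre_tri_to_adjacency tri) := by unfold Pre_tri_to_adjacency; infer_instance
def pvWitness_tri_to_adjacency : List (List Int) := [[0, 1, 2], [1, 2, 3]]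

def Spec_tri_to_adjacency (tri : List (List Int)) (out : List (Int × List Int)) : Prop := out = tri_to_adjacency_alt tri
instance (tri : List (List Int)) (out : List (Int × List Int)) : Decidable (Spec_tri_to_adjacency tri out) := by unfold Spec_tri_to_adjacency; infer_instance

-- ===== CLAIM (what is proved, stated in full; the proofs are below) =====
def Claim_equal_tri_to_adjacency : Prop := ∀ (tri : List (List Int)), Dom_tri_to_adjacency tri → Pre_tri_to_adjacency tri → Spec_tri_to_adjacency tri (tri_to_adjacency tri)

-- ===== LEMMAS AND PROOFS =====

-- Both programs are sequences of "append contribution list v at key k" dictionary updates;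
-- mstep is that single update, build the fold of it over a list of (key, contribution) pairs.
def mstep (d : PySem.Dict Int (List Int)) (p : Int × List Int) : PySem.Dict Int (List Int) :=
  d.modify p.1 [] (· ++ p.2)

def build (l : List (Int × List Int)) (d : PySem.Dict Int (List Int)) : PySem.Dict Int (List Int) :=
  l.foldl mstep d

def keyI (i : Int) (t : List Int) : Int := PySem.List.pyGetD t i 0

-- per-triangle contribution pairs of A's pass with column order (i, j, l): two singleton appends
def fRole (i j l : Int) (t : List Int) : List (Int × List Int) :=
  [(keyI i t, [keyI j t]), (keyI i t, [keyI l t])]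

-- per-triangle contribution pair of B's bucket for role order (i, j, l): one two-element append
def qRole (i j l : Int) (t : List Int) : Int × List Int :=
  (keyI i t, [keyI j t, keyI l t])

lemma upsert_eq_mstep (d : PySem.Dict Int (List Int)) (k : Int) (v : List Int) :
    (if d.contains k then d.modify k [] (· ++ v) else d.insert k v) = mstep d (k, v) := by
  by_cases h : d.contains k
  · simp [h, mstep]
  · simp only [h, Bool.false_eq_true, if_false, mstep, PySem.Dict.modify]
    rw [PySem.Dict.getD_of_not_contains _ _ (by simpa using h)]
    simp

lemma pyPut_eq_mstep (d : PySem.Dict Int (List Int)) (k : Int) (v : List Int) :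
    pyPut d k v = mstep d (k, v) := upsert_eq_mstep d k v

lemma getD_build (l : List (Int × List Int)) (d : PySem.Dict Int (List Int)) (c : Int) :
    (build l d).getD c [] =
      d.getD c [] ++ ((l.filter (fun p => p.1 == c)).map (·.2)).flatten := by
  induction l generalizing d with
  | nil => simp [build]
  | cons p rest ih =>
    obtain ⟨k, v⟩ := p
    simp only [build, List.foldl_cons] at ih ⊢
    rw [ih]
    by_cases h : k = c
    · subst h
      simp [mstep, PySem.Dict.getD_modify_self]
    · simp [mstep, PySem.Dict.getD_modify, h, Ne.symm h]

lemma keys_build (l : List (Int × List Int)) (d : PySem.Dict Int (List Int)) :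
    (build l d).keys = PySem.Set.update d.keys (l.map (·.1)) :=
  PySem.Dict.keys_foldl_modify_key l Prod.fst [] (fun _ p => (· ++ p.2)) d

lemma nodup_keys_build (l : List (Int × List Int)) (d : PySem.Dict Int (List Int))
    (h : d.keys.Nodup) : (build l d).keys.Nodup :=
  PySem.Dict.nodup_keys_foldl_modify_key l Prod.fst [] (fun _ p => (· ++ p.2)) d h

lemma flatten_filter_pairs (ps : List (Int × List Int)) (c : Int)
    (h : (ps.map (·.1)).Nodup) :
    ((ps.filter (fun p => p.1 == c)).map (·.2)).flatten =
      match (PySem.Dict.mk ps).get? c with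
      | some v => v
      | none => [] := by
  induction ps with
  | nil => simp [PySem.Dict.get?]
  | cons p rest ih =>
    obtain ⟨k, v⟩ := p
    simp only [List.map_cons, List.nodup_cons] at h
    rw [PySem.Dict.get?_mk_cons]
    by_cases hk : k = c
    · subst hk
      have hrest : rest.filter (fun p => p.1 == k) = [] := by
        apply List.filter_eq_nil_iff.mpr
        intro p hp hbeq
        exact h.1 (beq_iff_eq.mp hbeq ▸ List.mem_map.mpr ⟨p, hp, rfl⟩)
      simp [hrest]
    · have : ((k, v).1 == c) = false := by simpa using hk
      simp only [List.filter_cons, this, Bool.false_eq_true, if_false]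
      exact ih h.2

lemma block_eq (l : List (Int × List Int)) (c : Int) :
    (((build l PySem.Dict.empty).items.filter (fun p => p.1 == c)).map (·.2)).flatten =
      ((l.filter (fun p => p.1 == c)).map (·.2)).flatten := by
  have hnd : ((build l PySem.Dict.empty).items.map (·.1)).Nodup :=
    nodup_keys_build l PySem.Dict.empty (by simp [PySem.Dict.keys_empty])
  rw [flatten_filter_pairs _ c hnd]
  cases hg : (build l PySem.Dict.empty).get? c with
  | some v =>
    have := PySem.Dict.getD_of_get?_eq_some (d := build l PySem.Dict.empty) (d0 := ([] : List Int)) hg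
    rw [← this, getD_build]
    simp
  | none =>
    have hnc : (build l PySem.Dict.empty).contains c = false :=
      (PySem.Dict.get?_eq_none_iff_contains _ _).mp hg
    have hkeys : c ∉ (build l PySem.Dict.empty).keys := by
      intro hm
      rw [PySem.Dict.contains_eq_decide_mem_keys] at hnc
      simp [hm] at hnc
    rw [keys_build, PySem.Dict.keys_empty] at hkeys
    have : l.filter (fun p => p.1 == c) = [] := by
      apply List.filter_eq_nil_iff.mpr
      intro p hp hbeq
      apply hkeys
      have hc : c ∈ l.map (·.1) := List.mem_map.mpr ⟨p, hp, beq_iff_eq.mp hbeq⟩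
      rw [PySem.Set.mem_update]
      exact Or.inr (by simpa using hc)
    simp [this]

lemma flatten_filter_pass (i j l : Int) (tri : List (List Int)) (c : Int) :
    (((tri.flatMap (fRole i j l)).filter (fun p => p.1 == c)).map (·.2)).flatten =
      (((tri.map (qRole i j l)).filter (fun p => p.1 == c)).map (·.2)).flatten := by
  induction tri with
  | nil => simp
  | cons t rest ih =>
    simp only [List.flatMap_cons, List.map_cons, List.filter_append, List.filter_cons,
      List.map_append, List.flatten_append]
    by_cases hk : keyI i t = c
    · simp [fRole, qRole, hk, ih]
    · simp [fRole, qRole, hk, ih]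

lemma ofList_dup (tri : List (List Int)) (g : List Int → Int) :
    PySem.Set.ofList (tri.flatMap (fun t => [g t, g t])) = PySem.Set.ofList (tri.map g) := by
  induction tri with
  | nil => simp
  | cons t rest ih =>
    simp only [List.flatMap_cons, List.map_cons, List.cons_append, List.nil_append]
    rw [show (g t :: g t :: rest.flatMap (fun t => [g t, g t])) =
        (g t :: (g t :: rest.flatMap (fun t => [g t, g t]))) from rfl,
      PySem.Set.ofList_cons, PySem.Set.ofList_cons, PySem.Set.ofList_cons, ih]
    simp [PySem.Set.discard, List.filter_filter]

lemma update_ofList_right (s : PySem.Set Int) (xs : List Int) :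
    PySem.Set.update s (PySem.Set.ofList xs) = PySem.Set.update s xs := by
  rw [PySem.Set.update_eq_append_filter, PySem.Set.update_eq_append_filter,
    PySem.Set.ofList_ofList]

lemma build_append (xs ys : List (Int × List Int)) (d : PySem.Dict Int (List Int)) :
    build (xs ++ ys) d = build ys (build xs d) := by
  simp [build, List.foldl_append]

lemma passA (ci : List Int) (tri : List (List Int)) (d : PySem.Dict Int (List Int)) :
    tri.foldl (fun adj t =>
      (if adj.contains (PySem.List.pyGetD t (PySem.List.pyGetD ci 0 0) 0) then
          adj.modify (PySem.List.pyGetD t (PySem.List.pyGetD ci 0 0) 0) []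
            (· ++ [PySem.List.pyGetD t (PySem.List.pyGetD ci 1 0) 0])
        else adj.insert (PySem.List.pyGetD t (PySem.List.pyGetD ci 0 0) 0)
            [PySem.List.pyGetD t (PySem.List.pyGetD ci 1 0) 0]).modify
        (PySem.List.pyGetD t (PySem.List.pyGetD ci 0 0) 0) []
        (· ++ [PySem.List.pyGetD t (PySem.List.pyGetD ci 2 0) 0])) d =
    build (tri.flatMap (fRole (PySem.List.pyGetD ci 0 0) (PySem.List.pyGetD ci 1 0)
      (PySem.List.pyGetD ci 2 0))) d := by
  induction tri generalizing d with
  | nil => simp [build]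
  | cons t rest ih =>
    simp only [List.foldl_cons, List.flatMap_cons, build_append, ih]
    congr 1
    rw [upsert_eq_mstep]
    rfl

lemma passB (tri : List (List Int))
    (d0 d1 d2 : PySem.Dict Int (List Int)) :
    tri.foldl
      (fun (bs : PySem.Dict Int (List Int) × PySem.Dict Int (List Int) × PySem.Dict Int (List Int)) t =>
        (pyPut bs.1 (PySem.List.pyGetD t 0 0) [PySem.List.pyGetD t 1 0, PySem.List.pyGetD t 2 0],
         pyPut bs.2.1 (PySem.List.pyGetD t 1 0) [PySem.List.pyGetD t 2 0, PySem.List.pyGetD t 0 0],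
         pyPut bs.2.2 (PySem.List.pyGetD t 2 0) [PySem.List.pyGetD t 0 0, PySem.List.pyGetD t 1 0]))
      (d0, d1, d2) =
    (build (tri.map (qRole 0 1 2)) d0, build (tri.map (qRole 1 2 0)) d1,
     build (tri.map (qRole 2 0 1)) d2) := by
  induction tri generalizing d0 d1 d2 with
  | nil => simp [build]
  | cons t rest ih =>
    simp only [List.foldl_cons]
    rw [ih]
    simp only [pyPut_eq_mstep, build, List.map_cons, List.foldl_cons]
    rfl

lemma merge_fold (ps : List (Int × List Int)) (adj : PySem.Dict Int (List Int)) :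
    ps.foldl (fun adj p => pyPut adj p.1 p.2) adj = build ps adj := by
  have h : (fun (adj : PySem.Dict Int (List Int)) (p : Int × List Int) => pyPut adj p.1 p.2) = mstep :=
    funext fun adj => funext fun p => by rw [pyPut_eq_mstep]
  rw [build, h]

lemma A_eq (tri : List (List Int)) :
    tri_to_adjacency tri =
      (build (tri.flatMap (fRole 0 1 2) ++ tri.flatMap (fRole 1 2 0) ++ tri.flatMap (fRole 2 0 1))
        PySem.Dict.empty).items := by
  unfold tri_to_adjacency
  simp only [List.foldl_cons, List.foldl_nil]
  rw [passA, passA, passA]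
  have h00 : PySem.List.pyGetD (shift_list [0,1,2] 0) 0 0 = 0 := by decide
  have h01 : PySem.List.pyGetD (shift_list [0,1,2] 0) 1 0 = 1 := by decide
  have h02 : PySem.List.pyGetD (shift_list [0,1,2] 0) 2 0 = 2 := by decide
  have h10 : PySem.List.pyGetD (shift_list [0,1,2] 1) 0 0 = 1 := by decide
  have h11 : PySem.List.pyGetD (shift_list [0,1,2] 1) 1 0 = 2 := by decide
  have h12 : PySem.List.pyGetD (shift_list [0,1,2] 1) 2 0 = 0 := by decide
  have h20 : PySem.List.pyGetD (shift_list [0,1,2] 2) 0 0 = 2 := by decide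
  have h21 : PySem.List.pyGetD (shift_list [0,1,2] 2) 1 0 = 0 := by decide
  have h22 : PySem.List.pyGetD (shift_list [0,1,2] 2) 2 0 = 1 := by decide
  rw [h00, h01, h02, h10, h11, h12, h20, h21, h22, build_append, build_append]

lemma B_eq (tri : List (List Int)) :
    tri_to_adjacency_alt tri =
      (build ((build (tri.map (qRole 0 1 2)) PySem.Dict.empty).items ++
              (build (tri.map (qRole 1 2 0)) PySem.Dict.empty).items ++
              (build (tri.map (qRole 2 0 1)) PySem.Dict.empty).items)
        PySem.Dict.empty).items := by
  unfold tri_to_adjacency_alt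
  rw [passB]
  simp only [List.foldl_cons, List.foldl_nil]
  rw [merge_fold, merge_fold, merge_fold, build_append, build_append]

lemma update_dup (s : PySem.Set Int) (tri : List (List Int)) (g : List Int → Int) :
    PySem.Set.update s (tri.flatMap (fun t => [g t, g t])) = PySem.Set.update s (tri.map g) := by
  rw [PySem.Set.update_eq_append_filter, PySem.Set.update_eq_append_filter, ofList_dup]

lemma map_fst_pass (i j l : Int) (tri : List (List Int)) :
    (tri.flatMap (fRole i j l)).map (·.1) = tri.flatMap (fun t => [keyI i t, keyI i t]) := by
  simp [List.map_flatMap, fRole]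

lemma keys_eq (tri : List (List Int)) :
    (build (tri.flatMap (fRole 0 1 2) ++ tri.flatMap (fRole 1 2 0) ++ tri.flatMap (fRole 2 0 1))
        PySem.Dict.empty).keys =
    (build ((build (tri.map (qRole 0 1 2)) PySem.Dict.empty).items ++
            (build (tri.map (qRole 1 2 0)) PySem.Dict.empty).items ++
            (build (tri.map (qRole 2 0 1)) PySem.Dict.empty).items)
        PySem.Dict.empty).keys := by
  rw [keys_build, keys_build, PySem.Dict.keys_empty, PySem.Set.update_nil_left,
    PySem.Set.update_nil_left]
  simp only [List.map_append, map_fst_pass]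
  have hkeys : ∀ (i j l : Int),
      (build (tri.map (qRole i j l)) PySem.Dict.empty).items.map (·.1) =
        PySem.Set.ofList (tri.map (keyI i)) := by
    intro i j l
    have : (build (tri.map (qRole i j l)) PySem.Dict.empty).items.map (·.1) =
        (build (tri.map (qRole i j l)) PySem.Dict.empty).keys := rfl
    rw [this, keys_build, PySem.Dict.keys_empty, PySem.Set.update_nil_left, List.map_map]
    rfl
  rw [hkeys, hkeys, hkeys]
  rw [PySem.Set.ofList_append, PySem.Set.ofList_append]
  rw [update_dup, update_dup, ofList_dup]
  rw [PySem.Set.ofList_append, PySem.Set.ofList_append]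
  rw [update_ofList_right, update_ofList_right, PySem.Set.ofList_ofList]

lemma getD_eq (tri : List (List Int)) (c : Int) :
    (build (tri.flatMap (fRole 0 1 2) ++ tri.flatMap (fRole 1 2 0) ++ tri.flatMap (fRole 2 0 1))
        PySem.Dict.empty).getD c [] =
    (build ((build (tri.map (qRole 0 1 2)) PySem.Dict.empty).items ++
            (build (tri.map (qRole 1 2 0)) PySem.Dict.empty).items ++
            (build (tri.map (qRole 2 0 1)) PySem.Dict.empty).items)
        PySem.Dict.empty).getD c [] := by
  rw [getD_build, getD_build, PySem.Dict.getD_empty]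
  simp only [List.filter_append, List.map_append, List.flatten_append]
  rw [block_eq, block_eq, block_eq, flatten_filter_pass, flatten_filter_pass, flatten_filter_pass]

-- ===== VERDICT (by name: the statement is the Claim_ definition above) =====
theorem tri_to_adjacency_spec : Claim_equal_tri_to_adjacency := by
  intro tri _ _
  show tri_to_adjacency tri = tri_to_adjacency_alt tri
  rw [A_eq, B_eq]
  rw [PySem.Dict.items_eq_map_keys _ (nodup_keys_build _ _ (by simp [PySem.Dict.keys_empty])) ([] : List Int),
      PySem.Dict.items_eq_map_keys _ (nodup_keys_build _ _ (by simp [PySem.Dict.keys_empty])) ([] : List Int),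
      keys_eq]
  exact List.map_congr_left (fun k _ => by rw [getD_eq])
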